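-- pv_equiv track=rewrite | github.com/TensorScholar/Sorting-Visualizer | python/algorithms/comparison/shell-sort.py | hibbard_sequence
-- ===== SOURCE A (Python) =====
-- from typing import List, Any, Dict, Optional, Callable, Tuple, Set
--
-- def hibbard_sequence(n: int) -> List[int]:
--     """
--     Generate Hibbard's gap sequence: 2^k - 1, where k ≥ 1
--     1, 3, 7, 15, 31, 63, 127, 255, ...
--
--     Args:
--         n: Array length
--
--     Returns:
--         Gap sequence
--     """
--     gaps = []
--     k = 1
--     gap = (2 ** k) - 1
--
--     # Generate sequence in ascending order first
--     while gap < n: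
--         gaps.append(gap)
--         k += 1
--         gap = (2 ** k) - 1
--
--     # Reverse to get descending sequence
--     return sorted(gaps, reverse=True)
-- ===== SOURCE B (Python) =====
-- def hibbard_sequence(n: int):
--     # Closed form: largest k with 2^k - 1 < n is n.bit_length() - 1 (for n > 0),
--     # then emit the gaps directly in descending order.
--     k_max = n.bit_length() - 1 if n > 0 else 0
--     return [(1 << k) - 1 for k in range(k_max, 0, -1)]
-- ===== Notes on version B (the rewrite author's own statement) =====
-- stated objective: idiomatic
-- what changed: Replaces the while-loop search plus sorted(reverse=True) with a closed-form bound k_max = n.bit_length() - 1 and a single descending-range comprehension emitting the gaps directly.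
import Mathlib
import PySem

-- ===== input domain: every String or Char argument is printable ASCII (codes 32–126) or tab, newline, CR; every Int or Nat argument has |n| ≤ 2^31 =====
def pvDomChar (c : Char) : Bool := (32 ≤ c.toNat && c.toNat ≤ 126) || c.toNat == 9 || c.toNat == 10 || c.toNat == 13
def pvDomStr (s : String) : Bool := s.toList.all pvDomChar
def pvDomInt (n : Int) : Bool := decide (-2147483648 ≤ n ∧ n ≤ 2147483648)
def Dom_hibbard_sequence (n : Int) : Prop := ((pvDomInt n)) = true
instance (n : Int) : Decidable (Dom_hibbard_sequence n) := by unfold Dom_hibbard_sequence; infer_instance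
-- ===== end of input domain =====

-- B replaces A's while-loop search plus sorted(reverse=True) with a closed-form
-- bit_length bound and one descending-range comprehension (objective: idiomatic).

-- ===== PORT A =====
-- the while loop: gaps accumulated in order, k and gap advanced each step
def hibbardLoop (n : Int) (k : Nat) (gaps : List Int) : List Int :=
  if _h : (2 : Int) ^ k - 1 < n then
    hibbardLoop n (k + 1) (gaps ++ [(2 : Int) ^ k - 1])
  else gaps
termination_by (n - ((2 : Int) ^ k - 1)).toNat
decreasing_by
  have h1 : (1 : Int) ≤ 2 ^ k := one_le_pow₀ (by norm_num)
  have _h2 : (2 : Int) ^ (k + 1) = 2 ^ k * 2 := pow_succ 2 k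
  omega

def hibbard_sequence (n : Int) : List Int :=
  PySem.List.sorted (hibbardLoop n 1 []) (fun x => x) true

-- ===== PORT B =====
def hibbard_sequence_alt (n : Int) : List Int :=
  let kmax : Int := if 0 < n then (n.toNat.size : Int) - 1 else 0  -- n.bit_length() - 1 if n > 0 else 0
  (PySem.List.pyRange kmax 0 (-1)).map (fun k => 2 ^ k.toNat - 1)  -- (1 << k) - 1

-- ===== PRECONDITION & SPEC =====
def Spec_hibbard_sequence (n : Int) (out : List Int) : Prop := out = hibbard_sequence_alt n
instance (n : Int) (out : List Int) : Decidable (Spec_hibbard_sequence n out) := by unfold Spec_hibbard_sequence; infer_instance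

-- ===== CLAIM (what is proved, stated in full; the proofs are below) =====
def Claim_equal_hibbard_sequence : Prop := ∀ (n : Int), Dom_hibbard_sequence n → Spec_hibbard_sequence n (hibbard_sequence n)

-- ===== LEMMAS AND PROOFS =====

-- kb n = Python's k_max, as a Nat
def kbNat (n : Int) : Nat := if 0 < n then n.toNat.size - 1 else 0

-- the loop guard fires exactly for k ≤ kbNat n (for k ≥ 1)
lemma guard_iff (n : Int) (k : Nat) (hk : 1 ≤ k) :
    ((2 : Int) ^ k - 1 < n) ↔ k ≤ kbNat n := by
  unfold kbNat
  by_cases hn : 0 < n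
  · simp only [if_pos hn]
    have hsz : 1 ≤ n.toNat.size := by
      have : 0 < n.toNat := by omega
      exact Nat.size_pos.mpr this
    have hcast : ((n.toNat : Int)) = n := Int.toNat_of_nonneg (le_of_lt hn)
    constructor
    · intro h
      have h2 : (2 : Int) ^ k ≤ n := by omega
      have h3 : 2 ^ k ≤ n.toNat := by
        have := h2
        rw [← hcast] at this
        exact_mod_cast this
      have h4 : ¬ n.toNat < 2 ^ k := not_lt.mpr h3
      have h5 : ¬ n.toNat.size ≤ k := fun hle => h4 (Nat.size_le.mp hle)
      omega
    · intro h
      have h5 : ¬ n.toNat.size ≤ k := by omega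
      have h4 : ¬ n.toNat < 2 ^ k := fun hlt => h5 (Nat.size_le.mpr hlt)
      have h3 : 2 ^ k ≤ n.toNat := not_lt.mp h4
      have h2 : ((2 : Int) ^ k) ≤ n := by
        rw [← hcast]; exact_mod_cast h3
      omega
  · simp only [if_neg hn]
    have h1 : (1 : Int) ≤ 2 ^ k := one_le_pow₀ (by norm_num)
    constructor
    · intro h; omega
    · intro h; omega

-- the loop appends exactly the gaps 2^j - 1 for j = k .. kbNat n
lemma loop_eq (n : Int) : ∀ (d k : Nat) (acc : List Int), 1 ≤ k → kbNat n + 1 - k = d →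
    hibbardLoop n k acc = acc ++ (List.range' k d).map (fun j => (2 : Int) ^ j - 1) := by
  intro d
  induction d with
  | zero =>
    intro k acc hk hd
    have hnk : ¬ ((2 : Int) ^ k - 1 < n) := by
      rw [guard_iff n k hk]; omega
    rw [hibbardLoop, dif_neg hnk]
    simp
  | succ d ih =>
    intro k acc hk hd
    have hlt : (2 : Int) ^ k - 1 < n := by
      rw [guard_iff n k hk]; omega
    rw [hibbardLoop, dif_pos hlt]
    rw [ih (k + 1) (acc ++ [(2 : Int) ^ k - 1]) (by omega) (by omega)]
    simp [List.range'_succ]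

-- B's descending range, rewritten as a reverse of an ascending map
lemma alt_eq (n : Int) :
    hibbard_sequence_alt n =
      ((List.range' 1 (kbNat n)).map (fun j => (2 : Int) ^ j - 1)).reverse := by
  unfold hibbard_sequence_alt
  have hkm : (if (0:Int) < n then ((n.toNat.size : Int) - 1) else 0) = (kbNat n : Int) := by
    unfold kbNat
    by_cases hn : 0 < n
    · simp only [if_pos hn]
      have hsz : 1 ≤ n.toNat.size := Nat.size_pos.mpr (by omega)
      omega
    · simp [if_neg hn]
  simp only [hkm]
  rw [PySem.List.pyRange_neg_one_eq_reverse]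
  norm_num
  rw [PySem.List.pyRange_one]
  have hlen : (((kbNat n : Int) + 1 - 1)).toNat = kbNat n := by omega
  rw [hlen, List.range'_eq_map_range, List.map_map, List.map_map]
  apply List.map_congr_left
  intro j hj
  simp only [Function.comp_apply]
  have h1 : ((1 : Int) + (j : Int)).toNat = 1 + j := by omega
  rw [h1]

lemma a_gaps_pairwise (n : Int) :
    ((List.range' 1 (kbNat n)).map (fun j => (2 : Int) ^ j - 1)).Pairwise (· < ·) := by
  apply List.Pairwise.map
  · intro a b hab
    have : (2 : Int) ^ a < 2 ^ b := pow_lt_pow_right₀ (by norm_num) hab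
    omega
  · exact List.pairwise_lt_range' 1 Nat.one_pos

-- ===== VERDICT (by name: the statement is the Claim_ definition above) =====
theorem hibbard_sequence_spec : Claim_equal_hibbard_sequence := by
  intro n _
  unfold Spec_hibbard_sequence hibbard_sequence
  rw [loop_eq n (kbNat n) 1 [] (by omega) (by omega)]
  rw [List.nil_append, alt_eq]
  apply PySem.List.sorted_rev_eq_of_perm_of_pairwise_gt
  · exact (List.reverse_perm _)
  · rw [List.pairwise_reverse]
    exact a_gaps_pairwise n
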